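-- pv_equiv track=rewrite | github.com/Ressed/Tor-Botnet | deepfingerprinting-torch/utility.py | burst_feature
-- ===== SOURCE A (Python) =====
-- def burst_feature(flow):
--     res = []
--     l = 1
--     for i in range(1, len(flow)):
--         if flow[i] * flow[i - 1] < 0:
--             res.append(l)
--             l = 1
--         else:
--             l += 1
--     return res
-- ===== SOURCE B (Python) =====
-- def burst_feature(flow):
--     # Zip-based decomposition: sign-change boundary indices from adjacent
--     # pairs, then run lengths as differences of consecutive boundaries
--     # (the trailing run after the last boundary is not emitted, as in A).
--     boundaries = [i for i, (a, b) in enumerate(zip(flow, flow[1:]), 1) if a * b < 0]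
--     return [b - p for p, b in zip([0] + boundaries, boundaries)]
-- ===== Notes on version B (the rewrite author's own statement) =====
-- stated objective: alternative
-- what changed: Replaces the single stateful run-length counter fold with a zip-based pipeline: pair adjacent elements with zip, collect boundary indices via enumerate, then emit run lengths as differences of consecutive boundaries via a second zip.
import Mathlib
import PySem

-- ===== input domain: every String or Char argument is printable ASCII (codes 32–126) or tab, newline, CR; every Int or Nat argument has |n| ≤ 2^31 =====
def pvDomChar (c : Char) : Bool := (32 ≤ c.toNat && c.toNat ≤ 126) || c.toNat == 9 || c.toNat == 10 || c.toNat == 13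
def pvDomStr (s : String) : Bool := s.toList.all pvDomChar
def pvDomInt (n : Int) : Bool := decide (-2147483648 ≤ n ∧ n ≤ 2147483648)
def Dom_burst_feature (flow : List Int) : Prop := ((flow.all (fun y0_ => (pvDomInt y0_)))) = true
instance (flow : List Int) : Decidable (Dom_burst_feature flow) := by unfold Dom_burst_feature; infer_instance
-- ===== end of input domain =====

-- B replaces A's stateful run-length counter with a zip/enumerate pipeline:
-- boundary indices from adjacent pairs, then differences of consecutive
-- boundaries (alternative structure, same O(n) cost).

-- ===== PORT A =====
def burst_feature (flow : List Int) : List Int :=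
  ((PySem.List.pyRange 1 (flow.length : Int) 1).foldl
    (fun (st : List Int × Int) i =>
      if PySem.List.pyGetD flow i 0 * PySem.List.pyGetD flow (i - 1) 0 < 0
      then (st.1 ++ [st.2], 1)
      else (st.1, st.2 + 1))
    ([], 1)).1

-- ===== PORT B =====
def burst_feature_alt (flow : List Int) : List Int :=
  let boundaries : List Int :=
    (PySem.List.enumerate (flow.zip (PySem.List.slice flow (some 1) none)) 1).filterMap
      (fun p => if p.2.1 * p.2.2 < 0 then some p.1 else none)
  (List.zip ((0 : Int) :: boundaries) boundaries).map (fun q => q.2 - q.1)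

-- ===== PRECONDITION & SPEC =====
def Spec_burst_feature (flow : List Int) (out : List Int) : Prop := out = burst_feature_alt flow
instance (flow : List Int) (out : List Int) : Decidable (Spec_burst_feature flow out) := by unfold Spec_burst_feature; infer_instance

-- ===== CLAIM (what is proved, stated in full; the proofs are below) =====
def Claim_equal_burst_feature : Prop := ∀ (flow : List Int), Dom_burst_feature flow → Spec_burst_feature flow (burst_feature flow)

-- ===== LEMMAS AND PROOFS =====

-- A's fold step and the boundary-fold step over the filtered range.
def pvStepA (flow : List Int) (st : List Int × Int) (i : Int) : List Int × Int :=
  if PySem.List.pyGetD flow i 0 * PySem.List.pyGetD flow (i - 1) 0 < 0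
  then (st.1 ++ [st.2], 1) else (st.1, st.2 + 1)

def pvStepB (flow : List Int) (st : List Int × Int) (i : Int) : List Int × Int :=
  if PySem.List.pyGetD flow i 0 * PySem.List.pyGetD flow (i - 1) 0 < 0
  then (st.1 ++ [i - st.2], i) else st

-- Invariant over the common range 1..n: same emitted list, and A's counter
-- equals n minus B's last-boundary marker (for n ≥ 1).
lemma pv_inv (flow : List Int) (n : ℕ) :
    ((PySem.List.pyRange 1 (n : Int) 1).foldl (pvStepA flow) ([], 1)).1
      = ((PySem.List.pyRange 1 (n : Int) 1).foldl (pvStepB flow) ([], 0)).1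
    ∧ (1 ≤ n →
      ((PySem.List.pyRange 1 (n : Int) 1).foldl (pvStepA flow) ([], 1)).2
        = (n : Int) - ((PySem.List.pyRange 1 (n : Int) 1).foldl (pvStepB flow) ([], 0)).2) := by
  induction n with
  | zero => simp [PySem.List.pyRange_one_eq_nil]
  | succ m ih =>
    by_cases hm : 1 ≤ m
    · have hsplit : PySem.List.pyRange 1 ((m + 1 : ℕ) : Int) 1
          = PySem.List.pyRange 1 (m : Int) 1 ++ [(m : Int)] := by
        push_cast
        exact PySem.List.pyRange_one_succ_right (by exact_mod_cast hm)
      obtain ⟨h1, h2⟩ := ih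
      have h2' := h2 hm
      rw [hsplit]
      simp only [List.foldl_append, List.foldl_cons, List.foldl_nil]
      set sA := List.foldl (pvStepA flow) ([], (1 : Int)) (PySem.List.pyRange 1 (m : Int) 1) with hsA
      set sB := List.foldl (pvStepB flow) ([], (0 : Int)) (PySem.List.pyRange 1 (m : Int) 1) with hsB
      constructor
      · simp only [pvStepA, pvStepB]
        split_ifs with h
        · simp [h1, h2']
        · simpa using h1
      · intro _
        simp only [pvStepA, pvStepB]
        split_ifs with h
        · simp
        · simp
          omega
    · have hm0 : m = 0 := by omega
      subst hm0
      simp [PySem.List.pyRange_one_eq_nil]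

-- The boundary fold emits exactly the consecutive differences of the
-- boundary list seeded with prev.
lemma pv_fold_to_zip (bs : List Int) : ∀ (acc : List Int) (prev : Int),
    (bs.foldl (fun (st : List Int × Int) b => (st.1 ++ [b - st.2], b)) (acc, prev)).1
      = acc ++ (List.zip (prev :: bs) bs).map (fun q => q.2 - q.1) := by
  induction bs with
  | nil => intro acc prev; simp
  | cons b bs ih =>
    intro acc prev
    simp only [List.foldl_cons, List.zip_cons_cons, List.map_cons]
    rw [ih]
    simp

-- B's enumerate/zip boundary list equals the filtered index range of A.
lemma pv_bs_eq_go (flow : List Int) : ∀ (ys : List Int) (s : ℕ), flow.drop s = ys →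
    (PySem.List.enumerate (ys.zip ys.tail) ((s : Int) + 1)).filterMap
        (fun p => if p.2.1 * p.2.2 < 0 then some p.1 else none)
      = (PySem.List.pyRange ((s : Int) + 1) (flow.length : Int) 1).filter
        (fun i => decide (PySem.List.pyGetD flow i 0 * PySem.List.pyGetD flow (i - 1) 0 < 0)) := by
  intro ys
  induction ys with
  | nil =>
    intro s h
    have hn : flow.length ≤ s := by
      have := congrArg List.length h; simp at this; omega
    simp [PySem.List.pyRange_one_eq_nil (by exact_mod_cast by omega : (flow.length : Int) ≤ (s : Int) + 1)]
  | cons x ys ih =>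
    intro s h
    match ys, ih with
    | [], _ =>
      have hn : flow.length = s + 1 := by
        have := congrArg List.length h; simp at this; omega
      simp [hn]
    | y :: ys, ih =>
      have hlen : s + 2 ≤ flow.length := by
        have := congrArg List.length h; simp at this; omega
      have hx : flow[s]? = some x := by
        have : (flow.drop s)[0]? = some x := by rw [h]; rfl
        simpa using this
      have hy : flow[s+1]? = some y := by
        have : (flow.drop s)[1]? = some y := by rw [h]; rfl
        simpa using this
      have hdrop : flow.drop (s + 1) = y :: ys := by
        have := congrArg List.tail h
        simpa [List.tail_drop] using this
      have hgx : PySem.List.pyGetD flow ((s : Int)) 0 = x := by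
        rw [PySem.List.pyGetD_natCast]
        simp [List.getD, hx]
      have hgy : PySem.List.pyGetD flow ((s : Int) + 1) 0 = y := by
        have : ((s : Int) + 1) = ((s + 1 : ℕ) : Int) := by push_cast; ring
        rw [this, PySem.List.pyGetD_natCast]
        simp [List.getD, hy]
      have hrange : PySem.List.pyRange ((s : Int) + 1) (flow.length : Int) 1
          = ((s : Int) + 1) :: PySem.List.pyRange ((s : Int) + 2) (flow.length : Int) 1 := by
        have h1 : ((s : Int) + 1) < (flow.length : Int) := by exact_mod_cast by omega
        rw [PySem.List.pyRange_one_cons h1]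
        ring_nf
      have ihap := ih (s + 1) hdrop
      simp only [List.tail_cons] at ihap
      rw [hrange]
      simp only [List.zip_cons_cons, List.tail_cons, PySem.List.enumerate_cons,
        List.filterMap_cons, List.filter_cons]
      rw [show ((s : Int) + 1 - 1) = (s : Int) from by ring, hgx, hgy]
      rw [show ((s : Int) + 1 + 1) = (((s + 1 : ℕ) : Int) + 1) from by push_cast; ring,
          show ((s : Int) + 2) = (((s + 1 : ℕ) : Int) + 1) from by push_cast; ring]
      rw [ihap, show y * x = x * y from Int.mul_comm y x]
      by_cases hxy : x * y < 0
      · simp [hxy]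
      · simp [hxy]

-- ===== VERDICT (by name: the statement is the Claim_ definition above) =====
theorem burst_feature_spec : Claim_equal_burst_feature := by
  intro flow _
  have hbs := pv_bs_eq_go flow flow 0 (by simp)
  simp only [Nat.cast_zero, zero_add] at hbs
  unfold Spec_burst_feature burst_feature_alt
  rw [PySem.List.slice_from_one, hbs]
  set bsR := List.filter
      (fun i => decide (PySem.List.pyGetD flow i 0 * PySem.List.pyGetD flow (i - 1) 0 < 0))
      (PySem.List.pyRange 1 (flow.length : Int) 1) with hb
  show burst_feature flow = List.map (fun q => q.2 - q.1) (((0 : Int) :: bsR).zip bsR)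
  have e2 := pv_fold_to_zip bsR [] 0
  simp only [List.nil_append] at e2
  rw [← e2, hb, List.foldl_filter]
  unfold burst_feature
  have h1 := (pv_inv flow flow.length).1
  unfold pvStepA pvStepB at h1
  rw [h1]
  simp only [decide_eq_true_eq]
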